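-- pv_equiv track=rewrite | github.com/RAITec/BracoRobotico | software/src/tratamento_dados/tratamentoDados.py | processar_teste1
-- ===== SOURCE A (Python) =====
-- NUMEROS_MAP = {
--     "zero" : 0 , "cinco" : 5 , "dez" : 10 , "quinze" : 15 , "vinte" : 20 ,
--     "vinte e cinco" : 25 , "trinta" : 30 , "trinta e cinco" : 35 ,
--     "quarenta" : 40 , "quarenta e cinco" : 45 , "cinquenta" : 50 ,
--     "cinquenta e cinco" : 55 , "sessenta" : 60 , "sessenta e cinco" : 65 ,
--     "setenta" : 70 , "setenta e cinco" : 75 , "oitenta" : 80 ,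
--     "oitenta e cinco" : 85 , "noventa" : 90 , "noventa e cinco" : 95 ,
--     "cem" : 100 , "cento e cinco" : 105 , "cento e dez" : 110 ,
--     "cento e quinze" : 115 , "cento e vinte" : 120 , "cento e vinte e cinco" : 125 ,
--     "cento e trinta" : 130 , "cento e trinta e cinco" : 135 ,
--     "cento e quarenta" : 140 , "cento e quarenta e cinco" : 145 ,
--     "cento e cinquenta" : 150 , "cento e cinquenta e cinco" : 155 ,
--     "cento e sessenta" : 160 , "cento e sessenta e cinco" : 165 ,
--     "cento e setenta" : 170 , "cento e setenta e cinco" : 175 ,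
--     "cento e oitenta" : 180
-- }
--
-- def _extrair_valor_numerico(texto: str) -> int:
--     """
--     Encontra a sequencia numerica mais longa no texto
--     """
--     palavras = texto.split()
--
--     melhor_seq = ""
--     melhor_valor = 0
--
--     # procura sequencias de 1 a 5 palavras que valem pros mapas, sendo
--     # ex: cento e (alguma coisa) e (alguma coisa) -> 5 palavras
--     for comprimento in range (5, 0, -1):
--         for i in range(len(palavras) - comprimento + 1):
--             sequencia = " ".join(palavras[i:i+comprimento])
--
--             if sequencia in NUMEROS_MAP:
--                 valor = NUMEROS_MAP[sequencia]
--                 if comprimento > len(melhor_seq.split()):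
--                     melhor_seq = sequencia
--                     melhor_valor = valor
--     return melhor_valor
--
-- def processar_teste1(texto: str):
--     if "<unk>" in texto or not texto.strip():
--         return None
--
--     if any(p in texto for p in ["sair", "parar", "encerrar", "finalizar"]):
--         return "SAIR"
--
--     valor = _extrair_valor_numerico(texto)
--
--     valor = max(0, min(valor, 180))
--
--     if valor > 0:
--         return f"SERVO:{valor}"
--
--     return None
-- ===== SOURCE B (Python) =====
-- # B: same unk/empty/SAIR/clamp/SERVO wrapper, but the numeric helper scans the
-- # NUMEROS_MAP vocabulary (matching word-runs in the text) instead of enumerating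
-- # all length-5..1 text windows and joining them into strings.
--
-- NUMEROS_MAP = {
--     "zero" : 0 , "cinco" : 5 , "dez" : 10 , "quinze" : 15 , "vinte" : 20 ,
--     "vinte e cinco" : 25 , "trinta" : 30 , "trinta e cinco" : 35 ,
--     "quarenta" : 40 , "quarenta e cinco" : 45 , "cinquenta" : 50 ,
--     "cinquenta e cinco" : 55 , "sessenta" : 60 , "sessenta e cinco" : 65 ,
--     "setenta" : 70 , "setenta e cinco" : 75 , "oitenta" : 80 ,
--     "oitenta e cinco" : 85 , "noventa" : 90 , "noventa e cinco" : 95 ,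
--     "cem" : 100 , "cento e cinco" : 105 , "cento e dez" : 110 ,
--     "cento e quinze" : 115 , "cento e vinte" : 120 , "cento e vinte e cinco" : 125 ,
--     "cento e trinta" : 130 , "cento e trinta e cinco" : 135 ,
--     "cento e quarenta" : 140 , "cento e quarenta e cinco" : 145 ,
--     "cento e cinquenta" : 150 , "cento e cinquenta e cinco" : 155 ,
--     "cento e sessenta" : 160 , "cento e sessenta e cinco" : 165 ,
--     "cento e setenta" : 170 , "cento e setenta e cinco" : 175 ,
--     "cento e oitenta" : 180
-- }
--
-- def _extrair_valor_numerico(texto: str) -> int: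
--     palavras = texto.split()
--     melhor = None  # (numero de palavras, indice da primeira ocorrencia, valor)
--     for frase, valor in NUMEROS_MAP.items():
--         fw = frase.split()
--         n = len(fw)
--         idx = next((i for i in range(len(palavras) - n + 1)
--                     if palavras[i:i + n] == fw), None)
--         if idx is not None and (melhor is None or (n, -idx) > (melhor[0], -melhor[1])):
--             melhor = (n, idx, valor)
--     return melhor[2] if melhor is not None else 0
--
-- def processar_teste1(texto: str):
--     if "<unk>" in texto or not texto.strip():
--         return None
--
--     if any(p in texto for p in ["sair", "parar", "encerrar", "finalizar"]):
--         return "SAIR"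
--
--     valor = _extrair_valor_numerico(texto)
--
--     valor = max(0, min(valor, 180))
--
--     if valor > 0:
--         return f"SERVO:{valor}"
--
--     return None
-- ===== Notes on version B (the rewrite author's own statement) =====
-- stated objective: alternative
-- what changed: The numeric helper now scans the NUMEROS_MAP vocabulary, locating for each known phrase the leftmost contiguous run of its words in the text and selecting the candidate with most words (leftmost on ties), instead of enumerating and joining all length-5-down-to-1 text windows and probing the dict with each.
import Mathlib
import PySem

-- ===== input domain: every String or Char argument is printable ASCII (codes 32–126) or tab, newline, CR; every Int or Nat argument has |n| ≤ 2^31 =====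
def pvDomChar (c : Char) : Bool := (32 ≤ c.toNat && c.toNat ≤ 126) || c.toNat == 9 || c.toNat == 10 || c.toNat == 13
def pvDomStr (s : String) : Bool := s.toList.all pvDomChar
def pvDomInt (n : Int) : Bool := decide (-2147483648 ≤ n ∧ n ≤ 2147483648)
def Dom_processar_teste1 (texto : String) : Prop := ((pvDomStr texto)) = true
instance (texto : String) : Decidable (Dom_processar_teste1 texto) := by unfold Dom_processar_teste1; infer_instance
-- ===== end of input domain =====

-- B keeps the wrapper and replaces the window-enumeration helper by a scan of the
-- NUMEROS_MAP vocabulary (leftmost word-run per phrase, most words wins, leftmost on ties);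
-- objective: alternative (same cost, different traversal).

-- ===== PORT A =====
def NUMEROS_MAP : PySem.Dict String Int :=
  PySem.Dict.ofList [("zero",0),("cinco",5),("dez",10),("quinze",15),("vinte",20),
   ("vinte e cinco",25),("trinta",30),("trinta e cinco",35),
   ("quarenta",40),("quarenta e cinco",45),("cinquenta",50),
   ("cinquenta e cinco",55),("sessenta",60),("sessenta e cinco",65),
   ("setenta",70),("setenta e cinco",75),("oitenta",80),
   ("oitenta e cinco",85),("noventa",90),("noventa e cinco",95),
   ("cem",100),("cento e cinco",105),("cento e dez",110),
   ("cento e quinze",115),("cento e vinte",120),("cento e vinte e cinco",125),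
   ("cento e trinta",130),("cento e trinta e cinco",135),
   ("cento e quarenta",140),("cento e quarenta e cinco",145),
   ("cento e cinquenta",150),("cento e cinquenta e cinco",155),
   ("cento e sessenta",160),("cento e sessenta e cinco",165),
   ("cento e setenta",170),("cento e setenta e cinco",175),
   ("cento e oitenta",180)]

def extrairValorNumerico (texto : String) : Int :=
  let palavras := PySem.Str.split₀ texto
  let r := (PySem.List.pyRange 5 0 (-1)).foldl (fun st comprimento =>
      (PySem.List.pyRange 0 (PySem.List.len palavras - comprimento + 1) 1).foldl (fun st i =>
        let sequencia := PySem.Str.join " " (PySem.List.slice palavras (some i) (some (i + comprimento)))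
        match NUMEROS_MAP.get? sequencia with
        | some valor =>
            if comprimento > PySem.List.len (PySem.Str.split₀ st.1) then (sequencia, valor) else st
        | none => st) st) ("", (0 : Int))
  r.2

def processar_teste1 (texto : String) : Option String :=
  if PySem.Str.isIn "<unk>" texto || PySem.Str.strip texto == "" then none
  else if ["sair", "parar", "encerrar", "finalizar"].any (fun p => PySem.Str.isIn p texto) then some "SAIR"
  else
    let valor := extrairValorNumerico texto
    let valor := max 0 (min valor 180)
    if valor > 0 then some ("SERVO:" ++ PySem.Int.toStr valor) else none

-- ===== PORT B =====
def extrairValorNumericoAlt (texto : String) : Int :=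
  let palavras := PySem.Str.split₀ texto
  let melhor := NUMEROS_MAP.items.foldl (fun melhor fv =>
      let fw := PySem.Str.split₀ fv.1
      let n := PySem.List.len fw
      match (PySem.List.pyRange 0 (PySem.List.len palavras - n + 1) 1).find?
              (fun i => PySem.List.slice palavras (some i) (some (i + n)) == fw) with
      | some i =>
          match melhor with
          | none => some (n, i, fv.2)
          | some m => if n > m.1 ∨ (n = m.1 ∧ -i > -m.2.1) then some (n, i, fv.2) else melhor
      | none => melhor) (none : Option (Int × Int × Int))
  match melhor with
  | some m => m.2.2
  | none => 0

def processar_teste1_alt (texto : String) : Option String :=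
  if PySem.Str.isIn "<unk>" texto || PySem.Str.strip texto == "" then none
  else if ["sair", "parar", "encerrar", "finalizar"].any (fun p => PySem.Str.isIn p texto) then some "SAIR"
  else
    let valor := extrairValorNumericoAlt texto
    let valor := max 0 (min valor 180)
    if valor > 0 then some ("SERVO:" ++ PySem.Int.toStr valor) else none

-- ===== PRECONDITION & SPEC =====
def Spec_processar_teste1 (texto : String) (out : Option String) : Prop := out = processar_teste1_alt texto
instance (texto : String) (out : Option String) : Decidable (Spec_processar_teste1 texto out) := by unfold Spec_processar_teste1; infer_instance

-- ===== CLAIM (what is proved, stated in full; the proofs are below) =====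
def Claim_equal_processar_teste1 : Prop := ∀ (texto : String), Dom_processar_teste1 texto → Spec_processar_teste1 texto (processar_teste1 texto)

-- ===== LEMMAS AND PROOFS =====

-- word hygiene: every word produced by str.split() is nonempty and whitespace-free
def wOK (w : String) : Prop := w.toList ≠ [] ∧ ∀ c ∈ w.toList, PySem.Chars.isspace c = false
def wordsOK (ws : List String) : Prop := ∀ w ∈ ws, wOK w

lemma hyg_go (s : List Char) : ∀ (cur : List Char) (acc : List (List Char)),
    (∀ w ∈ acc, w ≠ [] ∧ ∀ c ∈ w, PySem.Chars.isspace c = false) →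
    (∀ c ∈ cur, PySem.Chars.isspace c = false) →
    ∀ w ∈ PySem.Chars.split₀.go s cur acc, w ≠ [] ∧ ∀ c ∈ w, PySem.Chars.isspace c = false := by
  induction s with
  | nil =>
    intro cur acc hacc hcur w hw
    rw [PySem.Chars.split₀.go] at hw
    by_cases hc : cur.isEmpty
    · rw [if_pos hc] at hw
      exact hacc w (List.mem_reverse.mp hw)
    · rw [if_neg hc] at hw
      rcases List.mem_cons.mp (List.mem_reverse.mp hw) with rfl | h
      · refine ⟨by simpa using (List.isEmpty_eq_false_iff.mp (by simpa using hc)), ?_⟩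
        intro c hcm; exact hcur c (List.mem_reverse.mp hcm)
      · exact hacc w h
  | cons c rest ih =>
    intro cur acc hacc hcur w hw
    rw [PySem.Chars.split₀.go] at hw
    by_cases hs : PySem.Chars.isspace c
    · rw [if_pos hs] at hw
      by_cases hc : cur.isEmpty
      · rw [if_pos hc] at hw
        exact ih [] acc hacc (by simp) w hw
      · rw [if_neg hc] at hw
        refine ih [] _ ?_ (by simp) w hw
        intro w' hw'
        rcases List.mem_cons.mp hw' with rfl | h
        · refine ⟨by simpa using (List.isEmpty_eq_false_iff.mp (by simpa using hc)), ?_⟩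
          intro c' hc'; exact hcur c' (List.mem_reverse.mp hc')
        · exact hacc w' h
    · rw [if_neg hs] at hw
      refine ih (c :: cur) acc hacc ?_ w hw
      intro c' hc'
      rcases List.mem_cons.mp hc' with rfl | h
      · simpa using hs
      · exact hcur c' h

lemma wordsOK_split₀ (texto : String) : wordsOK (PySem.Str.split₀ texto) := by
  intro w hw
  simp only [PySem.Str.split₀, PySem.Chars.split₀] at hw
  rcases List.mem_map.mp hw with ⟨wc, hwc, rfl⟩
  have h := hyg_go texto.toList [] [] (by simp) (by simp) wc hwc
  exact ⟨by simpa [String.toList_ofList] using h.1, by simpa [String.toList_ofList] using h.2⟩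

lemma go_append_nonspace (w : List Char) (hw : ∀ c ∈ w, PySem.Chars.isspace c = false) :
    ∀ (s' cur : List Char) (acc : List (List Char)),
    PySem.Chars.split₀.go (w ++ s') cur acc = PySem.Chars.split₀.go s' (w.reverse ++ cur) acc := by
  induction w with
  | nil => intro s' cur acc; simp
  | cons c w' ih =>
    intro s' cur acc
    have hc : PySem.Chars.isspace c = false := hw c (by simp)
    rw [List.cons_append, PySem.Chars.split₀.go, if_neg (by simp [hc])]
    rw [ih (fun c' hc' => hw c' (by simp [hc'])) s' (c :: cur) acc]
    simp

lemma intercalate_cc {α : Type} (sep a b : List α) (l : List (List α)) :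
    List.intercalate sep (a :: b :: l) = a ++ sep ++ List.intercalate sep (b :: l) := by
  simp [List.intercalate, List.intersperse]

lemma go_join (ws : List (List Char)) (h : ∀ w ∈ ws, w ≠ [] ∧ ∀ c ∈ w, PySem.Chars.isspace c = false) :
    ∀ acc, PySem.Chars.split₀.go (PySem.Chars.join [' '] ws) [] acc = acc.reverse ++ ws := by
  induction ws with
  | nil =>
    intro acc
    show PySem.Chars.split₀.go (List.intercalate [' '] []) [] acc = acc.reverse ++ []
    rw [show List.intercalate [' '] ([] : List (List Char)) = [] from rfl, PySem.Chars.split₀.go]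
    simp
  | cons w rest ih =>
    intro acc
    have hw := (h w (by simp)).2
    have hwne := (h w (by simp)).1
    cases rest with
    | nil =>
      show PySem.Chars.split₀.go (List.intercalate [' '] [w]) [] acc = _
      rw [show List.intercalate [' '] [w] = w from by simp [List.intercalate, List.intersperse]]
      rw [show w = w ++ ([] : List Char) from by simp]
      rw [go_append_nonspace w hw [] [] acc, PySem.Chars.split₀.go]
      rw [if_neg (by simpa using hwne)]
      simp
    | cons w2 rest' =>
      show PySem.Chars.split₀.go (List.intercalate [' '] (w :: w2 :: rest')) [] acc = _
      rw [intercalate_cc]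
      rw [List.append_assoc, go_append_nonspace w hw _ [] acc]
      rw [show ([' '] ++ List.intercalate [' '] (w2 :: rest')) = ' ' :: List.intercalate [' '] (w2 :: rest') from rfl]
      rw [PySem.Chars.split₀.go, if_pos (by decide)]
      rw [if_neg (by simpa using hwne)]
      have := ih (fun w' hw' => h w' (by simp [hw'])) (w.reverse.reverse :: acc)
      simp only [List.append_nil]
      rw [show ([' '].intercalate (w2 :: rest')) = PySem.Chars.join [' '] (w2 :: rest') from rfl, this]
      simp

lemma split₀_join_words (ws : List String) (h : wordsOK ws) :
    PySem.Str.split₀ (PySem.Str.join " " ws) = ws := by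
  simp only [PySem.Str.split₀, PySem.Chars.split₀]
  rw [PySem.Str.toList_join, show (" ").toList = [' '] from by decide]
  rw [go_join (ws.map String.toList) ?hyg []]
  · simp [Function.comp_def, String.ofList_toList]
  case hyg =>
    intro w' hw'
    rcases List.mem_map.mp hw' with ⟨w, hwm, rfl⟩
    exact ⟨(h w hwm).1, (h w hwm).2⟩

-- proof-side views of the two folds
def seqAt (ws : List String) (c i : Int) : String :=
  PySem.Str.join " " (PySem.List.slice ws (some i) (some (i + c)))

def innerStep (ws : List String) (c : Int) (st : String × Int) (i : Int) : String × Int :=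
  match NUMEROS_MAP.get? (seqAt ws c i) with
  | some valor => if c > PySem.List.len (PySem.Str.split₀ st.1) then (seqAt ws c i, valor) else st
  | none => st

set_option maxRecDepth 8192 in
lemma extrairA_eq (texto : String) :
    extrairValorNumerico texto =
      ((PySem.List.pyRange 5 0 (-1)).foldl (fun st c =>
        (PySem.List.pyRange 0 (PySem.List.len (PySem.Str.split₀ texto) - c + 1) 1).foldl
          (innerStep (PySem.Str.split₀ texto) c) st) ("", (0 : Int))).2 := rfl

def fwOf (p : String × Int) : List String := PySem.Str.split₀ p.1

def occ (ws : List String) (p : String × Int) : Option Int :=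
  (PySem.List.pyRange 0 (PySem.List.len ws - PySem.List.len (fwOf p) + 1) 1).find?
    (fun i => PySem.List.slice ws (some i) (some (i + PySem.List.len (fwOf p))) == fwOf p)

def bStep (ws : List String) (m : Option (Int × Int × Int)) (p : String × Int) : Option (Int × Int × Int) :=
  match occ ws p with
  | some i =>
      match m with
      | none => some (PySem.List.len (fwOf p), i, p.2)
      | some b => if PySem.List.len (fwOf p) > b.1 ∨ (PySem.List.len (fwOf p) = b.1 ∧ -i > -b.2.1)
                  then some (PySem.List.len (fwOf p), i, p.2) else m
  | none => m

set_option maxRecDepth 8192 in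
lemma extrairB_eq (texto : String) :
    extrairValorNumericoAlt texto =
      match NUMEROS_MAP.items.foldl (bStep (PySem.Str.split₀ texto)) none with
      | some m => m.2.2
      | none => 0 := rfl

-- concrete facts about the 37 vocabulary entries
set_option maxRecDepth 65536 in
lemma key_join : ∀ p ∈ NUMEROS_MAP.items, PySem.Str.join " " (PySem.Str.split₀ p.1) = p.1 := by decide
set_option maxRecDepth 65536 in
lemma key_len : ∀ p ∈ NUMEROS_MAP.items, 1 ≤ (PySem.Str.split₀ p.1).length ∧ (PySem.Str.split₀ p.1).length ≤ 5 := by decide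

-- generic fold/find? facts
lemma find?_pyRange_spec {p : Int → Bool} {a b i : Int}
    (h : (PySem.List.pyRange a b 1).find? p = some i) :
    a ≤ i ∧ i < b ∧ p i = true ∧ ∀ j, a ≤ j → j < i → p j = false := by
  have main : ∀ (n : Nat) (a : Int), (b - a).toNat ≤ n → (PySem.List.pyRange a b 1).find? p = some i →
      a ≤ i ∧ i < b ∧ p i = true ∧ ∀ j, a ≤ j → j < i → p j = false := by
    intro n
    induction n with
    | zero =>
      intro a h0 hf
      rw [PySem.List.pyRange_one_eq_nil (by omega)] at hf
      simp at hf
    | succ n ih =>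
      intro a hn hf
      by_cases hab : b ≤ a
      · rw [PySem.List.pyRange_one_eq_nil hab] at hf; simp at hf
      · rw [PySem.List.pyRange_one_cons (by omega)] at hf
        by_cases hpa : p a
        · rw [List.find?_cons_of_pos hpa] at hf
          obtain rfl : a = i := by simpa using hf
          exact ⟨le_refl _, by omega, hpa, fun j h1 h2 => by omega⟩
        · rw [List.find?_cons_of_neg hpa] at hf
          obtain ⟨h1, h2, h3, h4⟩ := ih (a + 1) (by omega) hf
          refine ⟨by omega, h2, h3, fun j hj1 hj2 => ?_⟩
          rcases eq_or_lt_of_le hj1 with rfl | hlt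
          · simpa using hpa
          · exact h4 j (by omega) hj2
  exact main (b - a).toNat a le_rfl h

lemma slice_len (ws : List String) (i c : Int) (h0 : 0 ≤ i) (hc : 0 ≤ c)
    (hr : i + c ≤ (ws.length : Int)) :
    (PySem.List.slice ws (some i) (some (i + c))).length = c.toNat := by
  rw [PySem.List.slice_toNat ws h0 (by omega)]
  simp only [List.length_take, List.length_drop]
  omega

lemma occ_spec (ws : List String) (q : String × Int) {j : Int} (h : occ ws q = some j) :
    0 ≤ j ∧ j + ((fwOf q).length : Int) ≤ (ws.length : Int) ∧
    PySem.List.slice ws (some j) (some (j + ((fwOf q).length : Int))) = fwOf q ∧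
    ∀ j', 0 ≤ j' → j' < j → PySem.List.slice ws (some j') (some (j' + ((fwOf q).length : Int))) ≠ fwOf q := by
  unfold occ at h
  simp only [PySem.List.len_eq] at h
  obtain ⟨h1, h2, h3, h4⟩ := find?_pyRange_spec h
  refine ⟨h1, by omega, by simpa using h3, fun j' hj1 hj2 => ?_⟩
  have := h4 j' hj1 hj2
  simpa using this

lemma occ_of_hit (ws : List String) (q : String × Int) {i' : Int} (h0 : 0 ≤ i')
    (hr : i' + ((fwOf q).length : Int) ≤ (ws.length : Int))
    (hs : PySem.List.slice ws (some i') (some (i' + ((fwOf q).length : Int))) = fwOf q) :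
    ∃ j, occ ws q = some j ∧ j ≤ i' := by
  have hmem : i' ∈ PySem.List.pyRange 0 (PySem.List.len ws - PySem.List.len (fwOf q) + 1) 1 := by
    rw [PySem.List.mem_pyRange_one]
    simp only [PySem.List.len_eq]
    omega
  have hsome : ((PySem.List.pyRange 0 (PySem.List.len ws - PySem.List.len (fwOf q) + 1) 1).find?
      (fun i => PySem.List.slice ws (some i) (some (i + PySem.List.len (fwOf q))) == fwOf q)).isSome := by
    rw [List.find?_isSome]
    exact ⟨i', hmem, by simp only [PySem.List.len_eq]; simpa using hs⟩
  obtain ⟨j, hj⟩ := Option.isSome_iff_exists.mp hsome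
  refine ⟨j, hj, ?_⟩
  by_contra hlt
  obtain ⟨_, _, _, h4⟩ := find?_pyRange_spec hj
  have := h4 i' h0 (by omega)
  simp only [PySem.List.len_eq] at this
  rw [hs] at this
  simp at this

lemma hit_char (ws : List String) (hyg : wordsOK ws) {c i v : Int} (h0 : 0 ≤ i) (hc : 0 ≤ c)
    (hr : i + c ≤ (ws.length : Int)) (h : NUMEROS_MAP.get? (seqAt ws c i) = some v) :
    ∃ q ∈ NUMEROS_MAP.items, PySem.List.slice ws (some i) (some (i + c)) = fwOf q ∧
      ((fwOf q).length : Int) = c ∧ v = q.2 := by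
  have hqmem := PySem.Dict.mem_items_of_get?_eq_some NUMEROS_MAP h
  refine ⟨(seqAt ws c i, v), hqmem, ?_, ?_, rfl⟩
  · show PySem.List.slice ws (some i) (some (i + c)) = PySem.Str.split₀ (seqAt ws c i)
    rw [show seqAt ws c i = PySem.Str.join " " (PySem.List.slice ws (some i) (some (i + c))) from rfl]
    rw [split₀_join_words _ (fun w hw => hyg w (PySem.List.mem_of_mem_slice ws _ _ hw))]
  · show ((PySem.Str.split₀ (seqAt ws c i)).length : Int) = c
    rw [show seqAt ws c i = PySem.Str.join " " (PySem.List.slice ws (some i) (some (i + c))) from rfl]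
    rw [split₀_join_words _ (fun w hw => hyg w (PySem.List.mem_of_mem_slice ws _ _ hw))]
    rw [slice_len ws i c h0 hc hr]
    omega

-- A-side fold lemmas
lemma inner_id (ws : List String) (c : Int) (l : List Int) (st : String × Int)
    (h : ∀ i ∈ l, NUMEROS_MAP.get? (seqAt ws c i) = none) :
    l.foldl (innerStep ws c) st = st := by
  induction l generalizing st with
  | nil => rfl
  | cons i l ih =>
    rw [List.foldl_cons]
    rw [show innerStep ws c st i = st from by unfold innerStep; rw [h i (by simp)]]
    exact ih _ (fun j hj => h j (by simp [hj]))

lemma inner_frozen (ws : List String) (c : Int) (l : List Int) (st : String × Int)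
    (h : c ≤ PySem.List.len (PySem.Str.split₀ st.1)) :
    l.foldl (innerStep ws c) st = st := by
  induction l generalizing st with
  | nil => rfl
  | cons i l ih =>
    rw [List.foldl_cons]
    rw [show innerStep ws c st i = st from by
      unfold innerStep
      cases hg : NUMEROS_MAP.get? (seqAt ws c i) with
      | none => rfl
      | some v => simp only []; rw [if_neg (by omega)]]
    exact ih _ h

lemma inner_first (ws : List String) (c : Int) (st : String × Int) (i v : Int)
    (hwc : PySem.List.len (PySem.Str.split₀ st.1) < c)
    (h0 : 0 ≤ i) (hiU : i < PySem.List.len ws - c + 1)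
    (hhit : NUMEROS_MAP.get? (seqAt ws c i) = some v)
    (hwcnew : PySem.List.len (PySem.Str.split₀ (seqAt ws c i)) = c)
    (hmin : ∀ j, 0 ≤ j → j < i → NUMEROS_MAP.get? (seqAt ws c j) = none) :
    (PySem.List.pyRange 0 (PySem.List.len ws - c + 1) 1).foldl (innerStep ws c) st = (seqAt ws c i, v) := by
  rw [PySem.List.pyRange_one_append 0 i _ h0 (by omega), PySem.List.pyRange_one_cons hiU]
  rw [List.foldl_append]
  rw [inner_id ws c _ st (fun j hj => by
    rw [PySem.List.mem_pyRange_one] at hj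
    exact hmin j hj.1 hj.2)]
  rw [List.foldl_cons]
  rw [show innerStep ws c st i = (seqAt ws c i, v) from by
    unfold innerStep; rw [hhit]; simp only []; rw [if_pos (by omega)]]
  exact inner_frozen ws c _ _ (by rw [hwcnew])

-- B-side invariant
def DomIn (ws : List String) (l : List (String × Int)) (n i v : Int) : Prop :=
  (∃ p ∈ l, n = ((fwOf p).length : Int) ∧ v = p.2 ∧ occ ws p = some i) ∧
  ∀ q ∈ l, ∀ j, occ ws q = some j →
    ((fwOf q).length : Int) < n ∨ (((fwOf q).length : Int) = n ∧ i ≤ j)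

lemma bfold_spec (ws : List String) (l : List (String × Int)) :
    (l.foldl (bStep ws) none = none ∧ ∀ q ∈ l, occ ws q = none) ∨
    (∃ n i v, l.foldl (bStep ws) none = some (n, i, v) ∧ DomIn ws l n i v) := by
  induction l using List.reverseRecOn with
  | nil => left; exact ⟨rfl, by simp⟩
  | append_singleton l q ih =>
    rw [List.foldl_append, List.foldl_cons, List.foldl_nil]
    rcases ih with ⟨hr, hnone⟩ | ⟨n, i, v, hr, ⟨⟨p, hp, hn, hv, hocc⟩, hdomall⟩⟩
    · rw [hr]
      cases hoq : occ ws q with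
      | none =>
        left
        refine ⟨by simp [bStep, hoq], ?_⟩
        intro q' hq'
        rcases List.mem_append.mp hq' with h | h
        · exact hnone q' h
        · obtain rfl : q' = q := by simpa using h
          exact hoq
      | some j =>
        right
        refine ⟨((fwOf q).length : Int), j, q.2, ?_, ⟨⟨q, by simp, rfl, rfl, hoq⟩, ?_⟩⟩
        · simp [bStep, hoq, PySem.List.len_eq]
        · intro q' hq' j' hoq'
          rcases List.mem_append.mp hq' with h | h
          · rw [hnone q' h] at hoq'; simp at hoq'
          · obtain rfl : q' = q := by simpa using h
            obtain rfl : j' = j := by rw [hoq] at hoq'; exact (Option.some.inj hoq').symm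
            exact Or.inr ⟨rfl, le_refl _⟩
    · rw [hr]
      cases hoq : occ ws q with
      | none =>
        right
        refine ⟨n, i, v, by simp [bStep, hoq], ⟨⟨p, by simp [hp], hn, hv, hocc⟩, ?_⟩⟩
        intro q' hq' j' hoq'
        rcases List.mem_append.mp hq' with h | h
        · exact hdomall q' h j' hoq'
        · obtain rfl : q' = q := by simpa using h
          rw [hoq] at hoq'; exact absurd hoq' (by simp)
      | some j =>
        have hsimp : bStep ws (some (n, i, v)) q =
            if PySem.List.len (fwOf q) > n ∨ (PySem.List.len (fwOf q) = n ∧ -j > -i)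
            then some (PySem.List.len (fwOf q), j, q.2) else some (n, i, v) := by
          simp [bStep, hoq]
        by_cases hrep : PySem.List.len (fwOf q) > n ∨ (PySem.List.len (fwOf q) = n ∧ -j > -i)
        · right
          refine ⟨((fwOf q).length : Int), j, q.2, ?_, ⟨⟨q, by simp, rfl, rfl, hoq⟩, ?_⟩⟩
          · rw [hsimp, if_pos hrep]; simp [PySem.List.len_eq]
          · intro q' hq' j' hoq'
            simp only [PySem.List.len_eq] at hrep
            rcases List.mem_append.mp hq' with h | h
            · rcases hdomall q' h j' hoq' with hlt | ⟨heq, hle⟩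
              · rcases hrep with hgt | ⟨heq2, hgt⟩
                · left; omega
                · left; omega
              · rcases hrep with hgt | ⟨heq2, hgt⟩
                · left; omega
                · right; exact ⟨by omega, by omega⟩
            · obtain rfl : q' = q := by simpa using h
              obtain rfl : j' = j := by rw [hoq] at hoq'; exact (Option.some.inj hoq').symm
              exact Or.inr ⟨rfl, le_refl _⟩
        · right
          refine ⟨n, i, v, ?_, ⟨⟨p, by simp [hp], hn, hv, hocc⟩, ?_⟩⟩
          · rw [hsimp, if_neg hrep]
          · intro q' hq' j' hoq'
            rcases List.mem_append.mp hq' with h | h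
            · exact hdomall q' h j' hoq'
            · obtain rfl : q' = q := by simpa using h
              obtain rfl : j' = j := by rw [hoq] at hoq'; exact (Option.some.inj hoq').symm
              push Not at hrep
              simp only [PySem.List.len_eq] at hrep
              omega

-- A evaluates to 0 when no phrase occurs
lemma outer_none (ws : List String) (hyg : wordsOK ws)
    (hnone : ∀ q ∈ NUMEROS_MAP.items, occ ws q = none) :
    ((PySem.List.pyRange 5 0 (-1)).foldl (fun st c =>
      (PySem.List.pyRange 0 (PySem.List.len ws - c + 1) 1).foldl (innerStep ws c) st) ("", (0 : Int))).2 = 0 := by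
  have hno : ∀ (c : Int), 0 ≤ c → ∀ i' ∈ PySem.List.pyRange 0 (PySem.List.len ws - c + 1) 1,
      NUMEROS_MAP.get? (seqAt ws c i') = none := by
    intro c hc i' hi'
    rw [PySem.List.mem_pyRange_one] at hi'
    simp only [PySem.List.len_eq] at hi'
    cases hg : NUMEROS_MAP.get? (seqAt ws c i') with
    | none => rfl
    | some v' =>
      exfalso
      obtain ⟨q, hq, hsq, hlq, _⟩ := hit_char ws hyg hi'.1 hc (by omega) hg
      obtain ⟨j, hocc, _⟩ := occ_of_hit ws q hi'.1 (by omega) (by rw [hlq]; exact hsq)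
      rw [hnone q hq] at hocc
      simp at hocc
  have hall : ∀ (L : List Int), (∀ c ∈ L, 0 ≤ c) →
      L.foldl (fun st c => (PySem.List.pyRange 0 (PySem.List.len ws - c + 1) 1).foldl (innerStep ws c) st)
        ("", (0 : Int)) = ("", (0 : Int)) := by
    intro L
    induction L with
    | nil => intro _; rfl
    | cons c L ih =>
      intro hL
      simp only [List.foldl_cons]
      rw [inner_id ws c _ _ (hno c (hL c (by simp)))]
      exact ih (fun c' h' => hL c' (by simp [h']))
  rw [hall _ (by decide)]

-- A evaluates to the dominant candidate's value
lemma outer_dom (ws : List String) (hyg : wordsOK ws) {n i v : Int}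
    (hdom : DomIn ws NUMEROS_MAP.items n i v) :
    ((PySem.List.pyRange 5 0 (-1)).foldl (fun st c =>
      (PySem.List.pyRange 0 (PySem.List.len ws - c + 1) 1).foldl (innerStep ws c) st) ("", (0 : Int))).2 = v := by
  obtain ⟨⟨p, hp, hn, hv, hocc⟩, hdomall⟩ := hdom
  obtain ⟨hi0, hilen, hislice, himin⟩ := occ_spec ws p hocc
  have hkl := key_len p hp
  have hn1 : 1 ≤ n := by rw [hn]; exact_mod_cast hkl.1
  have hn5 : n ≤ 5 := by rw [hn]; exact_mod_cast hkl.2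
  have hno_gt : ∀ c : Int, n < c → ∀ i' ∈ PySem.List.pyRange 0 (PySem.List.len ws - c + 1) 1,
      NUMEROS_MAP.get? (seqAt ws c i') = none := by
    intro c hcgt i' hi'
    rw [PySem.List.mem_pyRange_one] at hi'
    simp only [PySem.List.len_eq] at hi'
    cases hg : NUMEROS_MAP.get? (seqAt ws c i') with
    | none => rfl
    | some v' =>
      exfalso
      obtain ⟨q, hq, hsq, hlq, _⟩ := hit_char ws hyg hi'.1 (by omega) (by omega) hg
      obtain ⟨j', hoccq, _⟩ := occ_of_hit ws q hi'.1 (by omega) (by rw [hlq]; exact hsq)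
      rcases hdomall q hq j' hoccq with hlt | ⟨heq, _⟩
      · omega
      · omega
  have hslice_n : PySem.List.slice ws (some i) (some (i + n)) = fwOf p := by rw [hn]; exact hislice
  have hseq : seqAt ws n i = p.1 := by
    rw [show seqAt ws n i = PySem.Str.join " " (PySem.List.slice ws (some i) (some (i + n))) from rfl, hslice_n]
    exact key_join p hp
  have hhit : NUMEROS_MAP.get? (seqAt ws n i) = some v := by
    rw [hseq, hv]
    exact PySem.Dict.get?_of_mem_items NUMEROS_MAP (by simpa using hp) (PySem.Dict.nodup_keys_ofList _)
  have hwcnew : PySem.List.len (PySem.Str.split₀ (seqAt ws n i)) = n := by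
    rw [hseq]
    simp only [PySem.List.len_eq]
    rw [hn]
    rfl
  have hmin : ∀ j, 0 ≤ j → j < i → NUMEROS_MAP.get? (seqAt ws n j) = none := by
    intro j hj0 hji
    cases hg : NUMEROS_MAP.get? (seqAt ws n j) with
    | none => rfl
    | some v' =>
      exfalso
      obtain ⟨q, hq, hsq, hlq, _⟩ := hit_char ws hyg hj0 (by omega) (by omega) hg
      obtain ⟨j', hoccq, hj'le⟩ := occ_of_hit ws q hj0 (by omega) (by rw [hlq]; exact hsq)
      rcases hdomall q hq j' hoccq with hlt | ⟨_, hile⟩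
      · omega
      · omega
  have hiU : i < PySem.List.len ws - n + 1 := by simp only [PySem.List.len_eq]; omega
  have hwc0 : PySem.List.len (PySem.Str.split₀ (("", (0 : Int))).1) = 0 := by decide
  have hstart : (PySem.List.pyRange 0 (PySem.List.len ws - n + 1) 1).foldl (innerStep ws n) ("", (0 : Int))
      = (seqAt ws n i, v) :=
    inner_first ws n ("", (0 : Int)) i v (by rw [hwc0]; omega) hi0 hiU hhit hwcnew hmin
  have hwc2 : PySem.List.len (PySem.Str.split₀ ((seqAt ws n i, v)).1) = n := hwcnew
  have hfrozen : ∀ c : Int, c ≤ n →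
      (PySem.List.pyRange 0 (PySem.List.len ws - c + 1) 1).foldl (innerStep ws c) (seqAt ws n i, v)
        = (seqAt ws n i, v) :=
    fun c hc => inner_frozen ws c _ _ (by rw [hwc2]; exact hc)
  rw [show PySem.List.pyRange 5 0 (-1) = [5, 4, 3, 2, 1] from by decide]
  simp only [List.foldl_cons, List.foldl_nil]
  have hcase : n = 1 ∨ n = 2 ∨ n = 3 ∨ n = 4 ∨ n = 5 := by omega
  rcases hcase with rfl | rfl | rfl | rfl | rfl
  · rw [inner_id ws 5 _ _ (hno_gt 5 (by omega)), inner_id ws 4 _ _ (hno_gt 4 (by omega)),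
      inner_id ws 3 _ _ (hno_gt 3 (by omega)), inner_id ws 2 _ _ (hno_gt 2 (by omega)), hstart]
  · rw [inner_id ws 5 _ _ (hno_gt 5 (by omega)), inner_id ws 4 _ _ (hno_gt 4 (by omega)),
      inner_id ws 3 _ _ (hno_gt 3 (by omega)), hstart, hfrozen 1 (by omega)]
  · rw [inner_id ws 5 _ _ (hno_gt 5 (by omega)), inner_id ws 4 _ _ (hno_gt 4 (by omega)),
      hstart, hfrozen 2 (by omega), hfrozen 1 (by omega)]
  · rw [inner_id ws 5 _ _ (hno_gt 5 (by omega)), hstart, hfrozen 3 (by omega),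
      hfrozen 2 (by omega), hfrozen 1 (by omega)]
  · rw [hstart, hfrozen 4 (by omega), hfrozen 3 (by omega), hfrozen 2 (by omega), hfrozen 1 (by omega)]

lemma extrair_eq (texto : String) : extrairValorNumerico texto = extrairValorNumericoAlt texto := by
  have hyg := wordsOK_split₀ texto
  rw [extrairA_eq, extrairB_eq]
  rcases bfold_spec (PySem.Str.split₀ texto) NUMEROS_MAP.items with ⟨hB, hnone⟩ | ⟨n, i, v, hB, hdom⟩
  · rw [hB, outer_none _ hyg hnone]
  · rw [hB, outer_dom _ hyg hdom]

-- ===== VERDICT (by name: the statement is the Claim_ definition above) =====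
theorem processar_teste1_spec : Claim_equal_processar_teste1 := by
  intro texto _
  unfold Spec_processar_teste1 processar_teste1 processar_teste1_alt
  rw [extrair_eq]
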